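-- pv_equiv track=rewrite | github.com/hsgo2430/Dadam_Schedule_Organizer | DadamScheduleOrganizer/Feature/GetStudentInfo.py | arrangeStudentTimeTable
-- ===== SOURCE A (Python) =====
-- def arrangeStudentTimeTable(studentTimeTable):
--     studentWeekTimeTable = []
--
--     studentTimeTableRearranged = list(map(list, zip(*studentTimeTable)))
--     studentTimeTableRearranged.pop(0)
--
--     for timeTableFactor in studentTimeTableRearranged:
--         timeTableFactor.pop(0)
--         studentWeekTimeTable.append(timeTableFactor)
--
--     return studentWeekTimeTable
-- ===== SOURCE B (Python) =====
-- def arrangeStudentTimeTable(studentTimeTable):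
--     nrows = len(studentTimeTable)
--     ncols = min(len(row) for row in studentTimeTable)
--     return [[studentTimeTable[r][c] for r in range(1, nrows)]
--             for c in range(1, ncols)]
-- ===== Notes on version B (the rewrite author's own statement) =====
-- stated objective: idiomatic
-- what changed: Replaces the materialized zip-transpose with pop(0) mutations by a direct index-based comprehension that reads the needed cells column-by-column (ranges starting at 1 drop the first row/column; min row length replicates zip's truncation).
import Mathlib
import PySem

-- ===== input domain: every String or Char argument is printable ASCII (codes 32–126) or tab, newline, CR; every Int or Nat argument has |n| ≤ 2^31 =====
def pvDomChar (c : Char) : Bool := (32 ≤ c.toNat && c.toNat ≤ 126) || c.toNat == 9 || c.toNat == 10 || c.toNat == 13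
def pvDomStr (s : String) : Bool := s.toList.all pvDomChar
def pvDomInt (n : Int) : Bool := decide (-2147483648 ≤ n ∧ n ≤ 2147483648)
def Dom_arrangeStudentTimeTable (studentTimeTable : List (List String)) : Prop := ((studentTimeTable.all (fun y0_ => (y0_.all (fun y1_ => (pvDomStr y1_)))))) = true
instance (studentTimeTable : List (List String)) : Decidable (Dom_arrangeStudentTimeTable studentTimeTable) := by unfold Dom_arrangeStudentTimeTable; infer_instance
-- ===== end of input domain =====

-- B replaces the zip-transpose + pop(0) mutations by a direct index-based comprehension (idiomatic; return value only — neither version mutates its argument).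

-- ===== PORT A =====
-- zip(*rows): column i is the list of i-th elements, truncated at the shortest row.
def zipStar (rows : List (List String)) : List (List String) :=
  if h1 : rows = [] then []
  else if h2 : rows.all (fun r => !r.isEmpty) then
    rows.map (fun r => r.headI) :: zipStar (rows.map (fun r => r.tail))
  else []
termination_by rows.headI.length
decreasing_by
  cases rows with
  | nil => exact absurd rfl h1
  | cons h tl =>
    have hh : h ≠ [] := by
      have := List.all_eq_true.mp h2 h (by simp)
      simpa using this
    have := List.length_pos_iff.mpr hh
    simp [List.headI, List.length_tail]
    omega

def arrangeStudentTimeTable (studentTimeTable : List (List String)) : List (List String) :=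
  -- studentTimeTableRearranged = list(map(list, zip(*studentTimeTable)));
  -- .pop(0) drops the first column-list (raises IndexError when empty — excluded by Pre_);
  -- the for-loop then pops the head of each factor and appends it to the accumulator.
  ((zipStar studentTimeTable).tail).foldl (fun acc f => acc ++ [f.tail]) []

-- ===== PORT B =====
-- ncols = min(len(row) for row in rows): first length, then fold min (raises on [] — excluded by Pre_)
def minRowLen (rows : List (List String)) : Nat :=
  match rows with
  | [] => 0
  | h :: tl => tl.foldl (fun a r => min a r.length) h.length

def arrangeStudentTimeTable_alt (studentTimeTable : List (List String)) : List (List String) :=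
  -- [[table[r][c] for r in range(1, nrows)] for c in range(1, ncols)]
  (List.range' 1 (minRowLen studentTimeTable - 1)).map (fun c =>
    (List.range' 1 (studentTimeTable.length - 1)).map (fun r =>
      (studentTimeTable.getD r []).getD c ""))

-- ===== PRECONDITION & SPEC =====
-- Pre_ excludes exactly the inputs on which A raises IndexError (pop(0) on an empty
-- transpose): the empty table and tables whose shortest row is empty.
def Pre_arrangeStudentTimeTable (studentTimeTable : List (List String)) : Prop :=
  studentTimeTable ≠ [] ∧ ∀ r ∈ studentTimeTable, r ≠ []
instance (studentTimeTable : List (List String)) : Decidable (Pre_arrangeStudentTimeTable studentTimeTable) := by unfold Pre_arrangeStudentTimeTable; infer_instance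

def pvWitness_arrangeStudentTimeTable : List (List String) := [["a", "b"], ["c", "d"]]

def Spec_arrangeStudentTimeTable (studentTimeTable : List (List String)) (out : List (List String)) : Prop := out = arrangeStudentTimeTable_alt studentTimeTable
instance (studentTimeTable : List (List String)) (out : List (List String)) : Decidable (Spec_arrangeStudentTimeTable studentTimeTable out) := by unfold Spec_arrangeStudentTimeTable; infer_instance

-- ===== CLAIM (what is proved, stated in full; the proofs are below) =====
def Claim_equal_arrangeStudentTimeTable : Prop := ∀ (studentTimeTable : List (List String)), Dom_arrangeStudentTimeTable studentTimeTable → Pre_arrangeStudentTimeTable studentTimeTable → Spec_arrangeStudentTimeTable studentTimeTable (arrangeStudentTimeTable studentTimeTable)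


-- ===== LEMMAS AND PROOFS =====

theorem foldl_min_le (tl : List (List String)) (a : Nat) :
    tl.foldl (fun a r => min a r.length) a ≤ a := by
  induction tl generalizing a with
  | nil => simp
  | cons x xs ih =>
    simp only [List.foldl_cons]
    exact le_trans (ih _) (Nat.min_le_left _ _)

theorem foldl_min_zero (tl : List (List String)) (a : Nat)
    (h : ∃ r ∈ tl, r = []) : tl.foldl (fun a r => min a r.length) a = 0 := by
  induction tl generalizing a with
  | nil => simp at h
  | cons x xs ih =>
    simp only [List.foldl_cons]
    rcases h with ⟨r, hr, hre⟩
    rcases List.mem_cons.mp hr with h1 | h1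
    · subst h1; subst hre
      simpa using Nat.le_zero.mp (by simpa using foldl_min_le xs (min a 0))
    · exact ih _ ⟨r, h1, hre⟩

theorem foldl_min_pos (tl : List (List String)) (a : Nat)
    (ha : 1 ≤ a) (h : ∀ r ∈ tl, r ≠ []) :
    1 ≤ tl.foldl (fun a r => min a r.length) a := by
  induction tl generalizing a with
  | nil => simpa
  | cons x xs ih =>
    have h1 : 1 ≤ x.length := List.length_pos_iff.mpr (h x (by simp))
    simp only [List.foldl_cons]
    exact ih _ (by simpa using Nat.le_min.mpr ⟨ha, h1⟩) (fun r hr => h r (by simp [hr]))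

theorem foldl_min_pred (tl : List (List String)) (a : Nat) :
    (tl.map List.tail).foldl (fun a r => min a r.length) (a - 1)
      = tl.foldl (fun a r => min a r.length) a - 1 := by
  induction tl generalizing a with
  | nil => simp
  | cons x xs ih =>
    simp only [List.map_cons, List.foldl_cons, List.length_tail]
    rw [show min (a - 1) (x.length - 1) = min a x.length - 1 by omega]
    exact ih _

theorem minRowLen_tail (h : List String) (tl : List (List String)) :
    minRowLen ((h :: tl).map List.tail) = minRowLen (h :: tl) - 1 := by
  simp only [minRowLen, List.map_cons, List.length_tail]
  exact foldl_min_pred tl h.length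

theorem minRowLen_pos (h : List String) (tl : List (List String))
    (hall : ∀ r ∈ h :: tl, r ≠ []) : 1 ≤ minRowLen (h :: tl) := by
  simp only [minRowLen]
  exact foldl_min_pos tl h.length (List.length_pos_iff.mpr (hall h (by simp)))
    (fun r hr => hall r (by simp [hr]))

theorem minRowLen_zero (h : List String) (tl : List (List String))
    (hex : ∃ r ∈ h :: tl, r = []) : minRowLen (h :: tl) = 0 := by
  simp only [minRowLen]
  rcases hex with ⟨r, hr, hre⟩
  rcases List.mem_cons.mp hr with h1 | h1
  · subst h1
    rw [hre]
    simpa using Nat.le_zero.mp (by simpa using foldl_min_le tl 0)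
  · exact foldl_min_zero tl h.length ⟨r, h1, hre⟩

theorem range_succ_map {β : Type} (g : Nat → β) (k : Nat) :
    (List.range (k + 1)).map g = g 0 :: (List.range k).map (fun i => g (i + 1)) := by
  rw [List.range_succ_eq_map, List.map_cons, List.map_map]
  rfl

theorem zipStar_eq (n : Nat) : ∀ (rows : List (List String)), rows ≠ [] →
    rows.headI.length ≤ n →
    zipStar rows = (List.range (minRowLen rows)).map
      (fun i => rows.map (fun r => r.getD i "")) := by
  induction n with
  | zero =>
    intro rows hne hlen
    match rows with
    | h :: tl =>
      have hh : h = [] := List.length_eq_zero_iff.mp (Nat.le_zero.mp (by simpa [List.headI] using hlen))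
      have hna : ¬ ((h :: tl).all (fun r => !r.isEmpty)) = true := by simp [hh]
      rw [zipStar, dif_neg (by simp : ¬ (h :: tl) = []), dif_neg hna,
        minRowLen_zero h tl ⟨h, by simp, hh⟩]
      simp
  | succ n ih =>
    intro rows hne hlen
    match rows with
    | h :: tl =>
      rw [zipStar, dif_neg (by simp : ¬ (h :: tl) = [])]
      by_cases hall : ((h :: tl).all (fun r => !r.isEmpty)) = true
      · rw [dif_pos hall]
        have hne' : ∀ r ∈ h :: tl, r ≠ [] := by
          intro r hr
          simpa using List.all_eq_true.mp hall r hr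
        have hh : h ≠ [] := hne' h (by simp)
        have hpos := minRowLen_pos h tl hne'
        have hlen' : ((h :: tl).map List.tail).headI.length ≤ n := by
          simp only [List.map_cons, List.headI, List.length_tail]
          simp only [List.headI] at hlen
          omega
        rw [ih _ (by simp) hlen', minRowLen_tail h tl]
        obtain ⟨k, hk⟩ : ∃ k, minRowLen (h :: tl) = k + 1 :=
          ⟨minRowLen (h :: tl) - 1, by omega⟩
        rw [hk]
        rw [Nat.add_sub_cancel, range_succ_map]
        congr 1
        · show List.map (fun r => r.headI) (h :: tl) = List.map (fun r => r.getD 0 "") (h :: tl)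
          refine List.map_congr_left (fun r hr => ?_)
          match r, hne' r hr with
          | x :: xs, _ => rfl
        · simp only [List.map_map]
          refine List.map_congr_left (fun i _ => ?_)
          show List.map ((fun r => r.getD i "") ∘ List.tail) (h :: tl)
              = List.map (fun r => r.getD (i + 1) "") (h :: tl)
          refine List.map_congr_left (fun r hr => ?_)
          simp only [Function.comp_apply]
          match r, hne' r hr with
          | x :: xs, _ => rfl
      · rw [dif_neg hall]
        have hex : ∃ r ∈ h :: tl, r = [] := by
          by_contra hc
          simp only [not_exists, not_and] at hc
          exact hall (List.all_eq_true.mpr (fun r hr => by simpa using hc r hr))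
        rw [minRowLen_zero h tl hex]
        simp

theorem foldl_append_tail (l : List (List String)) (acc : List (List String)) :
    l.foldl (fun acc f => acc ++ [f.tail]) acc = acc ++ l.map List.tail := by
  induction l generalizing acc with
  | nil => simp
  | cons x xs ih => simp [ih]

theorem range'_map_getD {α β : Type} (tl : List α) (f : α → β) (d : α) :
    ∀ (pre : List α),
      (List.range' pre.length tl.length).map (fun i => f ((pre ++ tl).getD i d))
        = tl.map f := by
  induction tl with
  | nil => simp
  | cons x xs ih =>
    intro pre
    rw [List.length_cons, List.range'_succ, List.map_cons, List.map_cons]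
    congr 1
    · have hx : (pre ++ x :: xs).getD pre.length d = x := by
        simp [List.getD]
      rw [hx]
    · have h2 := ih (pre ++ [x])
      simpa [List.append_assoc] using h2

-- ===== VERDICT (by name: the statement is the Claim_ definition above) =====
theorem arrangeStudentTimeTable_spec : Claim_equal_arrangeStudentTimeTable := by
  intro t _ hpre
  obtain ⟨hne, hall⟩ := hpre
  unfold Spec_arrangeStudentTimeTable arrangeStudentTimeTable arrangeStudentTimeTable_alt
  match t, hne, hall with
  | h :: tl, _, hall =>
    rw [foldl_append_tail, List.nil_append]
    rw [zipStar_eq (h :: tl).headI.length _ (by simp) (le_refl _)]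
    obtain ⟨k, hk⟩ : ∃ k, minRowLen (h :: tl) = k + 1 :=
      ⟨minRowLen (h :: tl) - 1, by have := minRowLen_pos h tl hall; omega⟩
    rw [hk]
    have hinner : ∀ c : Nat,
        (List.range' 1 tl.length).map (fun r => ((h :: tl).getD r []).getD c "")
          = tl.map (fun row => row.getD c "") := by
      intro c
      simpa using range'_map_getD tl (fun row => row.getD c "") ([] : List String) [h]
    simp only [Nat.add_sub_cancel, List.length_cons, hinner]
    rw [range_succ_map, List.tail_cons, List.map_map, List.range'_eq_map_range, List.map_map]
    refine List.map_congr_left (fun i _ => ?_)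
    show List.tail (List.map (fun r => r.getD (i + 1) "") (h :: tl))
        = List.map (fun row => row.getD (1 + i) "") tl
    rw [List.map_cons, List.tail_cons, Nat.add_comm 1 i]
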